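-- pv_equiv track=rewrite | github.com/MasterALiReza/Call-Of-Duty-Attachments | handlers/inline/inline_handler.py | _select_best_weapon
-- ===== SOURCE A (Python) =====
-- def _select_best_weapon(q: str, items):
--     """انتخاب بهترین سلاح منطبق با کوئری از میان نتایج search"""
--     if not items:
--         return None
--     ql = q.lower()
--     uniques = []
--     for it in items:
--         category = None
--         weapon = None
--         try:
--             category = it.get('category')
--             weapon = it.get('weapon')
--         except Exception:
--             category = category or None
--             weapon = weapon or None
--         if not category or not weapon:
--             continue
--         key = (category, weapon)
--         if key not in uniques and category and weapon:
--             uniques.append(key)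
--     exact = next((w for w in uniques if w[1].lower() == ql), None)
--     if exact:
--         return exact
--     contains = next((w for w in uniques if ql in (w[1] or '').lower()), None)
--     if contains:
--         return contains
--     return uniques[0] if uniques else None
-- ===== SOURCE B (Python) =====
-- def _select_best_weapon(q: str, items):
--     """Single pass: return first exact match immediately; else remember the first
--     substring match and the first valid key as fallbacks."""
--     ql = q.lower()
--     contains = None
--     first = None
--     for it in items:
--         try:
--             category = it.get('category')
--             weapon = it.get('weapon')
--         except Exception:
--             continue
--         if not category or not weapon:
--             continue
--         key = (category, weapon)
--         if weapon.lower() == ql: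
--             return key
--         if contains is None and ql in weapon.lower():
--             contains = key
--         if first is None:
--             first = key
--     return contains or first
-- ===== Notes on version B (the rewrite author's own statement) =====
-- stated objective: simpler
-- what changed: B replaces A's build-a-dedup-list-then-three-separate-scans (exact, contains, first) with a single pass over the items that returns the first exact match immediately and keeps the first substring match and the first valid key as fallbacks; the uniques list disappears.
import Mathlib
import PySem

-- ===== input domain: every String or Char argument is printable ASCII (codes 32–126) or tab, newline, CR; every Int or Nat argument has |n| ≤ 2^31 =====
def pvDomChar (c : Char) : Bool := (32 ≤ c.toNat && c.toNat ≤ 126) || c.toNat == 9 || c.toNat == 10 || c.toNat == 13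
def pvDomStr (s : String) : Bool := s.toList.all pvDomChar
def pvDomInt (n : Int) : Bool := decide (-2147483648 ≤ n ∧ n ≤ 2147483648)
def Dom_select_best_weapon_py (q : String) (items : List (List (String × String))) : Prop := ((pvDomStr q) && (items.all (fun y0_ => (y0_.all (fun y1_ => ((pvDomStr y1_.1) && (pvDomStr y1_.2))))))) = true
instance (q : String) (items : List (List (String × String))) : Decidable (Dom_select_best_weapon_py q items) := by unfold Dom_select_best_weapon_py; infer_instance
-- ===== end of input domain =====

-- B replaces A's dedup-list-then-three-scans with a single pass that returns the first
-- exact match immediately and keeps the first substring match and first valid key as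
-- fallbacks (objective: simpler; the dedup list disappears).

-- ===== PORT A =====
def select_best_weapon_py (q : String) (items : List (List (String × String))) : Option (List String) :=
  if items = [] then
    none
  else
    let ql := PySem.Str.lower q
    let uniques : List (String × String) := items.foldl (fun uniques it =>
      let category := PySem.Dict.get? (PySem.Dict.mk it) "category"
      let weapon := PySem.Dict.get? (PySem.Dict.mk it) "weapon"
      match category, weapon with
      | some c, some w =>
        if c = "" ∨ w = "" then
          uniques
        else
          let key := (c, w)
          if key ∉ uniques ∧ ¬ c = "" ∧ ¬ w = "" then uniques ++ [key] else uniques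
      | _, _ => uniques) []
    match uniques.find? (fun w => PySem.Str.lower w.2 == ql) with
    | some e => some [e.1, e.2]
    | none =>
      match uniques.find? (fun w => PySem.Str.isIn ql (PySem.Str.lower (if w.2 = "" then "" else w.2))) with
      | some c => some [c.1, c.2]
      | none => match uniques with
        | [] => none
        | u :: _ => some [u.1, u.2]

-- ===== PORT B =====
def pvAltLoop (ql : String) (items : List (List (String × String)))
    (containsAcc firstAcc : Option (String × String)) : Option (String × String) :=
  match items with
  | [] => containsAcc.or firstAcc
  | it :: rest =>
    match PySem.Dict.get? (PySem.Dict.mk it) "category" with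
    | none => pvAltLoop ql rest containsAcc firstAcc
    | some c =>
      match PySem.Dict.get? (PySem.Dict.mk it) "weapon" with
      | none => pvAltLoop ql rest containsAcc firstAcc
      | some w =>
        if c = "" ∨ w = "" then
          pvAltLoop ql rest containsAcc firstAcc
        else if PySem.Str.lower w == ql then
          some (c, w)
        else
          pvAltLoop ql rest
            (if containsAcc = none ∧ PySem.Str.isIn ql (PySem.Str.lower w) then some (c, w) else containsAcc)
            (if firstAcc = none then some (c, w) else firstAcc)

def select_best_weapon_py_alt (q : String) (items : List (List (String × String))) : Option (List String) :=
  (pvAltLoop (PySem.Str.lower q) items none none).map (fun k => [k.1, k.2])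

-- ===== PRECONDITION & SPEC =====
def Spec_select_best_weapon_py (q : String) (items : List (List (String × String))) (out : Option (List String)) : Prop := out = select_best_weapon_py_alt q items
instance (q : String) (items : List (List (String × String))) (out : Option (List String)) : Decidable (Spec_select_best_weapon_py q items out) := by unfold Spec_select_best_weapon_py; infer_instance

-- ===== CLAIM (what is proved, stated in full; the proofs are below) =====
def Claim_equal_select_best_weapon_py : Prop := ∀ (q : String) (items : List (List (String × String))), Dom_select_best_weapon_py q items → Spec_select_best_weapon_py q items (select_best_weapon_py q items)

-- ===== LEMMAS AND PROOFS =====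

/-- The valid (category, weapon) key of one item, if any. -/
def pvKey? (it : List (String × String)) : Option (String × String) :=
  match PySem.Dict.get? (PySem.Dict.mk it) "category", PySem.Dict.get? (PySem.Dict.mk it) "weapon" with
  | some c, some w => if c = "" ∨ w = "" then none else some (c, w)
  | _, _ => none

def pvVK (items : List (List (String × String))) : List (String × String) :=
  items.filterMap pvKey?

/-- Ordered dedup relative to a seen list. -/
def pvDD (seen : List (String × String)) : List (String × String) → List (String × String)
  | [] => []
  | k :: ks => if k ∈ seen then pvDD seen ks else k :: pvDD (seen ++ [k]) ks

def pvPe (ql : String) (k : String × String) : Bool := PySem.Str.lower k.2 == ql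
def pvPc (ql : String) (k : String × String) : Bool := PySem.Str.isIn ql (PySem.Str.lower k.2)

def pvSpecFun (ql : String) (vk : List (String × String)) : Option (String × String) :=
  ((vk.find? (pvPe ql)).or ((vk.find? (pvPc ql)).or vk.head?))

lemma pv_if_or_eq (w : String) : (if w = "" then "" else w) = w := by
  by_cases h : w = "" <;> simp [h]

lemma pvFoldA (items : List (List (String × String))) (acc : List (String × String)) :
    items.foldl (fun uniques it =>
      let category := PySem.Dict.get? (PySem.Dict.mk it) "category"
      let weapon := PySem.Dict.get? (PySem.Dict.mk it) "weapon"
      match category, weapon with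
      | some c, some w =>
        if c = "" ∨ w = "" then
          uniques
        else
          let key := (c, w)
          if key ∉ uniques ∧ ¬ c = "" ∧ ¬ w = "" then uniques ++ [key] else uniques
      | _, _ => uniques) acc
    = (pvVK items).foldl (fun acc k => if k ∈ acc then acc else acc ++ [k]) acc := by
  induction items generalizing acc with
  | nil => simp [pvVK]
  | cons it rest ih =>
    simp only [List.foldl_cons]
    rcases hc : PySem.Dict.get? (PySem.Dict.mk it) "category" with _ | c <;>
      rcases hw : PySem.Dict.get? (PySem.Dict.mk it) "weapon" with _ | w <;>
      simp only [pvVK, List.filterMap_cons, pvKey?, hc, hw] <;>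
      try exact ih acc
    by_cases h : c = "" ∨ w = ""
    · simp only [if_pos h]
      exact ih acc
    · have h1 : ¬ c = "" := fun hc' => h (Or.inl hc')
      have h2 : ¬ w = "" := fun hw' => h (Or.inr hw')
      simp only [if_neg h, List.foldl_cons]
      by_cases hm : (c, w) ∈ acc
      · rw [if_neg (by simp [hm]), if_pos hm]
        exact ih acc
      · rw [if_pos ⟨hm, h1, h2⟩, if_neg hm]
        exact ih (acc ++ [(c, w)])

lemma pvFold_dd (ks : List (String × String)) (acc : List (String × String)) :
    ks.foldl (fun acc k => if k ∈ acc then acc else acc ++ [k]) acc = acc ++ pvDD acc ks := by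
  induction ks generalizing acc with
  | nil => simp [pvDD]
  | cons k ks ih =>
    by_cases h : k ∈ acc
    · simp [pvDD, h, ih]
    · simp [pvDD, h, ih (acc ++ [k])]

lemma pvFind_filter_congr (p r r' : (String × String) → Bool)
    (h : ∀ z, p z = true → r z = r' z) (ks : List (String × String)) :
    (ks.filter r).find? p = (ks.filter r').find? p := by
  induction ks with
  | nil => rfl
  | cons k ks ih =>
    by_cases hp : p k = true
    · have hk := h k hp
      by_cases hr : r' k = true
      · simp [hk, hr, hp]
      · have hr2 : r' k = false := by simpa using hr
        simp [hk, hr2, ih]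
    · have hp' : p k = false := by simpa using hp
      by_cases hr : r k = true <;> by_cases hr' : r' k = true <;>
        simp [hr, hr', hp', ih]

lemma pvFind_dd (p : (String × String) → Bool) (ks seen : List (String × String)) :
    (pvDD seen ks).find? p = (ks.filter (fun k => decide (k ∉ seen))).find? p := by
  induction ks generalizing seen with
  | nil => rfl
  | cons k ks ih =>
    by_cases h : k ∈ seen
    · simp [pvDD, h, ih]
    · by_cases hp : p k = true
      · simp [pvDD, h, hp]
      · have hp' : p k = false := by simpa using hp
        simp only [pvDD, if_neg h, List.filter_cons, decide_eq_true_eq, List.find?_cons, hp',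
          if_pos (by simpa using h)]
        rw [ih (seen ++ [k])]
        apply pvFind_filter_congr
        intro z hz
        have : z ≠ k := fun he => by rw [he] at hz; rw [hz] at hp'; cases hp'
        simp [this, List.mem_append]

/-- Port A computes the canonical selection over the valid keys. -/
lemma pvA_char (q : String) (items : List (List (String × String))) :
    select_best_weapon_py q items
      = (pvSpecFun (PySem.Str.lower q) (pvVK items)).map (fun k => [k.1, k.2]) := by
  by_cases hnil : items = []
  · subst hnil; rfl
  · have hcpred : (fun (w : String × String) =>
        PySem.Str.isIn (PySem.Str.lower q) (PySem.Str.lower (if w.2 = "" then "" else w.2)))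
        = pvPc (PySem.Str.lower q) := by
      funext w; rw [pv_if_or_eq]; rfl
    have hpe : (fun (w : String × String) => PySem.Str.lower w.2 == PySem.Str.lower q)
        = pvPe (PySem.Str.lower q) := rfl
    simp only [select_best_weapon_py, if_neg hnil, pvFoldA, pvFold_dd, List.nil_append,
      hcpred, hpe, pvFind_dd]
    have hfil : ((pvVK items).filter (fun k => decide (k ∉ ([] : List (String × String)))))
        = pvVK items := by simp
    rw [hfil]
    unfold pvSpecFun
    rcases hfe : (pvVK items).find? (pvPe (PySem.Str.lower q)) with _ | e
    · rcases hfc : (pvVK items).find? (pvPc (PySem.Str.lower q)) with _ | c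
      · simp only [Option.none_or]
        cases hvk : pvVK items <;> simp [pvDD]
      · simp [Option.or]
    · simp [Option.or]

/-- B's loop in terms of the valid keys and the accumulators. -/
lemma pvB_loop (ql : String) (items : List (List (String × String)))
    (c f : Option (String × String)) :
    pvAltLoop ql items c f
      = match (pvVK items).find? (pvPe ql) with
        | some k => some k
        | none => (c.or ((pvVK items).find? (pvPc ql))).or (f.or (pvVK items).head?) := by
  induction items generalizing c f with
  | nil => cases c <;> cases f <;> simp [pvAltLoop, pvVK, Option.or]
  | cons it rest ih =>
    rw [pvAltLoop]
    rcases hc : PySem.Dict.get? (PySem.Dict.mk it) "category" with _ | cat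
    · have hvk : pvVK (it :: rest) = pvVK rest := by
        cases hw : PySem.Dict.get? (PySem.Dict.mk it) "weapon" <;> simp [pvVK, pvKey?, hc, hw]
      rw [hvk]; simp only [hc]; exact ih c f
    rcases hw : PySem.Dict.get? (PySem.Dict.mk it) "weapon" with _ | w
    · have hvk : pvVK (it :: rest) = pvVK rest := by
        simp [pvVK, pvKey?, hc, hw]
      rw [hvk]; simp only [hc, hw]; exact ih c f
    · simp only [hc, hw]
      by_cases h : cat = "" ∨ w = ""
      · have hvk : pvVK (it :: rest) = pvVK rest := by
          simp [pvVK, pvKey?, hc, hw, h]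
        rw [hvk, if_pos h]; exact ih c f
      · have hvk : pvVK (it :: rest) = (cat, w) :: pvVK rest := by
          simp [pvVK, pvKey?, hc, hw, h]
        rw [hvk, if_neg h]
        by_cases he : (PySem.Str.lower w == ql) = true
        · have hpe : pvPe ql (cat, w) = true := by simpa [pvPe] using he
          simp [he, hpe]
        · have he' : pvPe ql (cat, w) = false := by simpa [pvPe] using he
          rw [if_neg he, ih]
          simp only [List.find?_cons, he', cond_false]
          rcases hfe : (pvVK rest).find? (pvPe ql) with _ | k
          · cases c with
            | some c0 => simp [Option.or]
            | none =>
              by_cases hpc : PySem.Str.isIn ql (PySem.Str.lower w) = true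
              · have hpc' : pvPc ql (cat, w) = true := by simpa [pvPc] using hpc
                have hpcC : PySem.Chars.isIn ql.toList (PySem.Chars.lower w.toList) = true := by
                  simpa [PySem.Str.isIn, PySem.Str.lower] using hpc
                simp [hpcC, hpc', Option.or]
              · have hpc' : pvPc ql (cat, w) = false := by simpa [pvPc] using hpc
                have hpcC : PySem.Chars.isIn ql.toList (PySem.Chars.lower w.toList) = false := by
                  simpa [PySem.Str.isIn, PySem.Str.lower] using hpc
                have hnone : (if (none : Option (String × String)) = none ∧
                    PySem.Str.isIn ql (PySem.Str.lower w) = true then some (cat, w)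
                    else (none : Option (String × String))) = none := by
                  simp [PySem.Str.isIn, PySem.Str.lower, hpcC]
                simp only [hnone, hpc', cond_false] <;> skip
                cases f <;> cases hxc : (pvVK rest).find? (pvPc ql) <;>
                  simp [Option.or, hpcC]
          · simp

lemma pvB_char (q : String) (items : List (List (String × String))) :
    select_best_weapon_py_alt q items
      = (pvSpecFun (PySem.Str.lower q) (pvVK items)).map (fun k => [k.1, k.2]) := by
  unfold select_best_weapon_py_alt
  rw [pvB_loop]
  unfold pvSpecFun
  rcases (pvVK items).find? (pvPe (PySem.Str.lower q)) with _ | e <;> simp [Option.or]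

-- ===== VERDICT (by name: the statement is the Claim_ definition above) =====
theorem select_best_weapon_py_spec : Claim_equal_select_best_weapon_py := by
  intro q items _
  unfold Spec_select_best_weapon_py
  rw [pvA_char, pvB_char]
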